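-- pv_equiv track=rewrite | github.com/malusccp/beecrowd | beecrowd_1024.py | deslocar_texto_parte_final
-- ===== SOURCE A (Python) =====
-- def deslocar_texto_parte_final(texto):
--   meio = len(texto) // 2
--
--   novo_texto = ''
--   for index in range(0, len(texto), 1):
--     caracter_atual = texto[index]
--     if index >= meio:
--       novo_texto += chr(ord(caracter_atual) - 1)
--     else:
--       novo_texto += caracter_atual
--
--   return novo_texto
-- ===== SOURCE B (Python) =====
-- def deslocar_texto_parte_final(texto):
--   meio = len(texto) // 2
--   return texto[:meio] + ''.join(chr(ord(c) - 1) for c in texto[meio:])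
-- ===== Notes on version B (the rewrite author's own statement) =====
-- stated objective: simpler
-- what changed: Replaces the index-driven loop with a per-character boundary branch by a midpoint split: the first half is copied as a raw slice and the shift is mapped only over the second slice, with no per-character indexing or branching.
import Mathlib
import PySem

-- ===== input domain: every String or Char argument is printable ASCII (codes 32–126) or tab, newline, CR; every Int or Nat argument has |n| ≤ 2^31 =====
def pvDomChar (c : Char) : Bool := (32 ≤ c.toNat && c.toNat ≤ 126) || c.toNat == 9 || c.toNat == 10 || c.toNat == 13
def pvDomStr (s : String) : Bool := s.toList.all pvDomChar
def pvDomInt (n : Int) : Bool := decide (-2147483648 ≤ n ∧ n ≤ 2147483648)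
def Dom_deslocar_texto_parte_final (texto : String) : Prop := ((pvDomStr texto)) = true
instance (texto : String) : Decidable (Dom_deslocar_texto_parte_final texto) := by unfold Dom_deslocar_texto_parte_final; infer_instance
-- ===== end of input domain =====

-- B replaces A's single index-driven pass with a per-character boundary branch by a midpoint
-- split: untouched prefix slice ++ shift mapped over the suffix slice (objective: simpler).

-- ===== PORT A =====
-- A: meio = len//2; loop index over range(len), append shifted char if index >= meio else the char.
def deslocar_texto_parte_final (texto : String) : String :=
  let cs := texto.toList
  let meio := PySem.Int.floordiv (PySem.Str.len texto) 2
  let novo_texto : List Char :=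
    (PySem.List.pyRange 0 (PySem.Str.len texto) 1).foldl
      (fun novo_texto index =>
        let caracter_atual := PySem.List.pyGetD cs index ' '
        if index ≥ meio then novo_texto ++ [Char.ofNat (caracter_atual.toNat - 1)]
        else novo_texto ++ [caracter_atual]) []
  String.mk novo_texto

-- ===== PORT B =====
-- B: texto[:meio] + ''.join(chr(ord(c)-1) for c in texto[meio:])
def deslocar_texto_parte_final_alt (texto : String) : String :=
  let cs := texto.toList
  let meio := cs.length / 2
  String.mk (cs.take meio ++ (cs.drop meio).map (fun c => Char.ofNat (c.toNat - 1)))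

-- ===== PRECONDITION & SPEC =====
def Spec_deslocar_texto_parte_final (texto : String) (out : String) : Prop := out = deslocar_texto_parte_final_alt texto
instance (texto : String) (out : String) : Decidable (Spec_deslocar_texto_parte_final texto out) := by unfold Spec_deslocar_texto_parte_final; infer_instance

-- ===== CLAIM (what is proved, stated in full; the proofs are below) =====
def Claim_equal_deslocar_texto_parte_final : Prop := ∀ (texto : String), Dom_deslocar_texto_parte_final texto → Spec_deslocar_texto_parte_final texto (deslocar_texto_parte_final texto)

-- ===== LEMMAS AND PROOFS =====

-- The range-indexed conditional map equals the take/map-drop split, for any list and midpoint m ≤ n.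
lemma range_map_split (cs : List Char) (m : Nat) (hm : m ≤ cs.length)
    (f : Char → Char) :
    (List.range cs.length).map
      (fun k => if m ≤ k then f (cs.getD k ' ') else cs.getD k ' ')
      = cs.take m ++ (cs.drop m).map f := by
  apply List.ext_getElem
  · simp [Nat.min_eq_left hm]; omega
  · intro k hk _
    simp only [List.getElem_map, List.getElem_range]
    have hk' : k < cs.length := by simpa using hk
    rw [List.getElem_append]
    by_cases h : m ≤ k
    · rw [if_pos h]
      have : ¬ k < (cs.take m).length := by simp [Nat.min_eq_left hm]; omega
      rw [dif_neg this]
      simp [Nat.min_eq_left hm, List.getElem?_eq_getElem hk', Nat.add_sub_cancel' (by simpa [Nat.min_eq_left hm] using h : m ≤ k)]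
    · rw [if_neg h]
      have hlt : k < (cs.take m).length := by simp [Nat.min_eq_left hm]; omega
      rw [dif_pos hlt]
      simp [List.getElem?_eq_getElem hk']

lemma foldA (cs : List Char) :
    List.foldl (fun novo index =>
        if index ≥ PySem.Int.floordiv (↑cs.length) 2 then
          novo ++ [Char.ofNat ((PySem.List.pyGetD cs index ' ').toNat - 1)]
        else novo ++ [PySem.List.pyGetD cs index ' ']) [] (PySem.List.pyRange 0 ↑cs.length 1)
      = cs.take (cs.length / 2) ++ (cs.drop (cs.length / 2)).map (fun c => Char.ofNat (c.toNat - 1)) := by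
  have hfd : PySem.Int.floordiv (↑cs.length) 2 = ((cs.length / 2 : Nat) : Int) :=
    PySem.Int.floordiv_natCast _ _
  simp only [hfd, PySem.List.pyRange_zero_natCast, List.foldl_map]
  have hfun : (fun (novo : List Char) (k : Nat) =>
      if (↑k : Int) ≥ ((cs.length / 2 : Nat) : Int) then
        novo ++ [Char.ofNat ((PySem.List.pyGetD cs (↑k) ' ').toNat - 1)]
      else novo ++ [PySem.List.pyGetD cs (↑k) ' '])
      = (fun novo k => novo ++
          [if cs.length / 2 ≤ k then Char.ofNat ((cs.getD k ' ').toNat - 1) else cs.getD k ' ']) := by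
    funext novo k
    simp only [PySem.List.pyGetD_natCast, ge_iff_le, Int.ofNat_le]
    split_ifs <;> rfl
  rw [hfun, PySem.List.foldl_append_singleton_eq_map, List.nil_append]
  exact range_map_split cs (cs.length / 2) (Nat.div_le_self _ _) (fun c => Char.ofNat (c.toNat - 1))

-- ===== VERDICT (by name: the statement is the Claim_ definition above) =====
theorem deslocar_texto_parte_final_spec : Claim_equal_deslocar_texto_parte_final := by
  intro texto _
  unfold Spec_deslocar_texto_parte_final deslocar_texto_parte_final deslocar_texto_parte_final_alt
  simp only [PySem.Str.len_eq]
  exact congrArg String.mk (foldA texto.toList)
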